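-- pv_equiv track=rewrite | github.com/IDK04/Projeto-fp-1 | main.py | corta_texto
-- ===== SOURCE A (Python) =====
-- def corta_texto(texto, largura):
--     '''Divide o texto pela ultima palavra completa em função da largura.
--
--     Sem depenências
--
--     Parametros: str, int
--     Retorna: (str,str)
--     '''
--     palavras = texto.split()
--     len_total = 0
--     i = 0
--     # Econtrar a última palavra completa contida pela largura desejada
--     for i, palavra in enumerate(palavras):
--         len_total += len(palavra)
--         if largura < len_total:
--             break
--         # Contar com o espaço entre palavras
--         len_total += 1
--     if len(texto) <= largura:
--         i += 1
--     return ' '.join(palavras[:i]), ' '.join(palavras[i:])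
-- ===== SOURCE B (Python) =====
-- def corta_texto(texto, largura):
--     '''Divide o texto pela ultima palavra completa em função da largura.
--
--     String-level version: normalize the whitespace once with ' '.join, then
--     the cut index is simply the number of spaces inside the first largura+1
--     characters of the normalized string (every space there ends a complete
--     word that fits), or the total space count when the whole line fits.
--     '''
--     palavras = texto.split()
--     norm = ' '.join(palavras)
--     if len(norm) <= largura:
--         i = norm.count(' ')
--     else:
--         i = norm[:max(largura + 1, 0)].count(' ')
--     if len(texto) <= largura:
--         i += 1
--     return ' '.join(palavras[:i]), ' '.join(palavras[i:])
-- ===== Notes on version B (the rewrite author's own statement) =====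
-- stated objective: alternative
-- what changed: B drops A's accumulate-word-widths-and-break loop entirely: it normalizes the text once with ' '.join and obtains the cut index by counting the space characters inside the first largura+1 characters of that normalized string (or all of its spaces when it fully fits), i.e. a character-level count over a string prefix instead of a word-level running-sum scan.
import Mathlib
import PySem

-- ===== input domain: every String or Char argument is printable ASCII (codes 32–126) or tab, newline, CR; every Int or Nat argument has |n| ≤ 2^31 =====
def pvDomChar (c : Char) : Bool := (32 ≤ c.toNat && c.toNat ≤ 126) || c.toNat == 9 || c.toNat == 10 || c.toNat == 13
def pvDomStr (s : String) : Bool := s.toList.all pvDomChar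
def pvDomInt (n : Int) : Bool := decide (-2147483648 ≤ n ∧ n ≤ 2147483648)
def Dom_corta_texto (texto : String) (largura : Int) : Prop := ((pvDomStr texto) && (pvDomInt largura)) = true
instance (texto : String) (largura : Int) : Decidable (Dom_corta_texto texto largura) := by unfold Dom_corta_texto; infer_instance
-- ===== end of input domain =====

-- B replaces A's accumulate-and-break word scan by counting spaces in a prefix of the normalized string; same O(n) cost.

-- ===== PORT A =====
-- A's fused loop: accumulate len_total over enumerate(palavras), break when largura < len_total.
def cortaLoopA (largura : Int) : List (Int × String) → Int → Int → Int
  | [], _, i => i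
  | (k, w) :: rest, lenTotal, _ =>
      if largura < lenTotal + PySem.Str.len w then k
      else cortaLoopA largura rest (lenTotal + PySem.Str.len w + 1) k

def corta_texto (texto : String) (largura : Int) : String × String :=
  let palavras := PySem.Str.split₀ texto
  let i := cortaLoopA largura (PySem.List.enumerate palavras 0) 0 0
  let i := if PySem.Str.len texto ≤ largura then i + 1 else i
  (PySem.Str.join " " (PySem.List.slice palavras none (some i)),
   PySem.Str.join " " (PySem.List.slice palavras (some i) none))

-- ===== PORT B =====
def corta_texto_alt (texto : String) (largura : Int) : String × String :=
  let palavras := PySem.Str.split₀ texto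
  let norm := PySem.Str.join " " palavras
  let i : Int :=
    if PySem.Str.len norm ≤ largura then (PySem.Str.count norm " " : Int)
    else (PySem.Str.count (PySem.Str.slice norm none (some (max (largura + 1) 0))) " " : Int)
  let i := if PySem.Str.len texto ≤ largura then i + 1 else i
  (PySem.Str.join " " (PySem.List.slice palavras none (some i)),
   PySem.Str.join " " (PySem.List.slice palavras (some i) none))

-- ===== PRECONDITION & SPEC =====
def Spec_corta_texto (texto : String) (largura : Int) (out : String × String) : Prop := out = corta_texto_alt texto largura
instance (texto : String) (largura : Int) (out : String × String) : Decidable (Spec_corta_texto texto largura out) := by unfold Spec_corta_texto; infer_instance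

-- ===== CLAIM (what is proved, stated in full; the proofs are below) =====
def Claim_equal_corta_texto : Prop := ∀ (texto : String) (largura : Int), Dom_corta_texto texto largura → Spec_corta_texto texto largura (corta_texto texto largura)

-- ===== LEMMAS AND PROOFS =====

-- proof-side recursive characterization of the break index, shared by both reductions
def idxSpec (largura : Int) : List (List Char) → Int
  | [] => 0
  | w :: rest =>
      if largura < (w.length : Int) then 0
      else match rest with
        | [] => 0
        | _ :: _ => 1 + idxSpec (largura - w.length - 1) rest

-- a word list is "good" when every word is nonempty and whitespace-free (what split() produces)
def GoodWords (ws : List (List Char)) : Prop :=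
  ∀ w ∈ ws, w ≠ [] ∧ ∀ c ∈ w, PySem.Chars.isspace c = false

theorem goodWords_split₀_go (s cur : List Char) (acc : List (List Char))
    (hcur : ∀ c ∈ cur, PySem.Chars.isspace c = false)
    (hacc : GoodWords acc.reverse) :
    GoodWords (PySem.Chars.split₀.go s cur acc) := by
  induction s generalizing cur acc with
  | nil =>
      by_cases h : cur = []
      · simpa [PySem.Chars.split₀.go, h] using hacc
      · have : cur.isEmpty = false := by simpa [List.isEmpty_iff] using h
        simp only [PySem.Chars.split₀.go, this]
        intro w hw
        rcases (by simpa using hw : w ∈ acc.reverse ∨ w = cur.reverse) with hw' | rfl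
        · exact hacc w hw'
        · exact ⟨by simpa using h, fun c hc => hcur c (by simpa using hc)⟩
  | cons c rest ih =>
      by_cases hs : PySem.Chars.isspace c = true
      · by_cases h : cur = []
        · simpa [PySem.Chars.split₀.go, hs, h] using ih [] acc (by simp) hacc
        · have hne : cur.isEmpty = false := by simpa [List.isEmpty_iff] using h
          simp only [PySem.Chars.split₀.go, hs, hne, if_true]
          refine ih [] (cur.reverse :: acc) (by simp) ?_
          intro w hw
          rcases (by simpa using hw : w ∈ acc.reverse ∨ w = cur.reverse) with hw' | rfl
          · exact hacc w hw'
          · exact ⟨by simpa using h, fun d hd => hcur d (by simpa using hd)⟩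
      · have hs' : PySem.Chars.isspace c = false := by simpa using hs
        simp only [PySem.Chars.split₀.go, hs', Bool.false_eq_true, if_false]
        refine ih (c :: cur) acc ?_ hacc
        intro d hd
        rcases List.mem_cons.mp hd with rfl | hd'
        · exact hs'
        · exact hcur d hd'

theorem goodWords_split₀ (s : List Char) : GoodWords (PySem.Chars.split₀ s) :=
  goodWords_split₀_go s [] [] (by simp) (by intro w hw; simp at hw)

-- A's loop computes idxSpec
theorem loopA_eq_idxSpec (largura : Int) (ws : List String) (s t prev : Int) :
    cortaLoopA largura (PySem.List.enumerate ws s) t prev =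
      (if ws = [] then prev else s + idxSpec (largura - t) (ws.map String.toList)) := by
  induction ws generalizing s t prev with
  | nil => simp [PySem.List.enumerate_nil, cortaLoopA]
  | cons w rest ih =>
      have hlen : PySem.Str.len w = (w.toList.length : Int) := by
        simp [PySem.Str.len_eq]
      rw [PySem.List.enumerate_cons]
      simp only [cortaLoopA, hlen, ih]
      rw [if_neg (List.cons_ne_nil _ _)]
      by_cases h : largura < t + (w.toList.length : Int)
      · rw [if_pos h]
        have h0 : idxSpec (largura - t) (List.map String.toList (w :: rest)) = 0 := by
          simp only [List.map_cons, idxSpec]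
          rw [if_pos (show largura - t < ((String.toList w).length : Int) by omega)]
        rw [h0]; ring
      · rw [if_neg h]
        rcases rest with _ | ⟨r, rest'⟩
        · have h0 : idxSpec (largura - t) [w.toList] = 0 := by
            simp only [idxSpec]
            rw [if_neg (show ¬ largura - t < (w.toList.length : Int) by omega)]
          simp [h0]
        · rw [if_neg (List.cons_ne_nil _ _)]
          have e1 : largura - (t + (w.toList.length : Int) + 1)
              = largura - t - w.toList.length - 1 := by ring
          rw [e1]
          have h2 : idxSpec (largura - t) (List.map String.toList (w :: r :: rest')) =
              1 + idxSpec (largura - t - (String.toList w).length - 1)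
                    (List.map String.toList (r :: rest')) := by
            simp only [List.map_cons, idxSpec]
            rw [if_neg (show ¬ largura - t < ((String.toList w).length : Int) by omega)]
          rw [h2]; ring

-- single-character count is List.count
theorem countGo_single (c : Char) (fuel : Nat) (cs : List Char) (acc : Nat)
    (h : cs.length ≤ fuel) :
    PySem.Chars.count.go [c] fuel cs acc = acc + cs.count c := by
  induction fuel generalizing cs acc with
  | zero =>
      have : cs = [] := List.length_eq_zero_iff.mp (Nat.le_zero.mp h)
      subst this; simp [PySem.Chars.count.go]
  | succ n ih =>
      rcases cs with _ | ⟨d, cs'⟩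
      · simp [PySem.Chars.count.go]
      · simp only [PySem.Chars.count.go]
        by_cases hd : d = c
        · subst hd
          have : [d].isPrefixOf (d :: cs') = true := by simp [List.isPrefixOf]
          rw [if_pos this]
          simp only [List.length_singleton, List.drop_one, List.tail_cons]
          rw [ih cs' (acc + 1) (by simpa using Nat.lt_succ_iff.mp (by simpa using h))]
          simp [List.count_cons_self]
          omega
        · have : [c].isPrefixOf (d :: cs') = false := by
            simp [List.isPrefixOf]
            intro hcd
            exact absurd hcd.symm hd
          rw [if_neg (by simp [this])]
          rw [ih cs' acc (by simpa using Nat.lt_succ_iff.mp (by simpa using h))]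
          rw [List.count_cons_of_ne hd]
  
theorem count_single (c : Char) (cs : List Char) :
    PySem.Chars.count cs [c] = cs.count c := by
  simp [PySem.Chars.count]
  have := countGo_single c cs.length cs 0 le_rfl
  omega

-- B's count formula computes idxSpec on good word lists
theorem countFormula_eq_idxSpec (ws : List (List Char)) (hg : GoodWords ws) (largura : Int) :
    (if ((List.intercalate [' '] ws).length : Int) ≤ largura
      then ((List.intercalate [' '] ws).count ' ' : Int)
      else ((List.take (largura + 1).toNat (List.intercalate [' '] ws)).count ' ' : Int))
    = idxSpec largura ws := by
  induction ws generalizing largura with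
  | nil => simp [List.intercalate, idxSpec]
  | cons w rest ih =>
      obtain ⟨hwne, hwns⟩ := hg w (List.mem_cons_self)
      have hwlen : 0 < w.length := List.length_pos_iff.mpr hwne
      have hwcnt : w.count ' ' = 0 := by
        rw [List.count_eq_zero]
        intro hsp
        have := hwns ' ' hsp
        simp [PySem.Chars.isspace] at this
      rcases rest with _ | ⟨r, rest'⟩
      · -- single word: no spaces anywhere
        have h1 : List.intercalate [' '] [w] = w := by simp [List.intercalate]
        rw [h1]
        have h2 : (List.take (largura + 1).toNat w).count ' ' = 0 := by
          rw [List.count_eq_zero]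
          intro hsp
          have := hwns ' ' (List.mem_of_mem_take hsp)
          simp [PySem.Chars.isspace] at this
        simp [idxSpec, hwcnt, h2]
      · have hrest : GoodWords (r :: rest') := fun v hv => hg v (List.mem_cons_of_mem w hv)
        have hI : List.intercalate [' '] (w :: r :: rest') =
            w ++ ' ' :: List.intercalate [' '] (r :: rest') := by
          simp [List.intercalate, List.intersperse]
        rw [hI]
        set tail := List.intercalate [' '] (r :: rest') with htail
        have htlen : 1 ≤ tail.length := by
          have : r.length ≤ tail.length := by
            rw [htail]
            rcases rest' with _ | ⟨x, xs⟩ <;> simp [List.intercalate, List.intersperse]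
          have hr1 : 0 < r.length :=
            List.length_pos_iff.mpr (hrest r List.mem_cons_self).1
          omega
        by_cases hb : largura < (w.length : Int)
        · -- cut before the first word: idxSpec = 0, and the prefix contains no space
          have hlen : ¬ ((w ++ ' ' :: tail).length : Int) ≤ largura := by
            simp only [List.length_append, List.length_cons]
            push_cast
            omega
          rw [if_neg hlen]
          have hsmall : (largura + 1).toNat ≤ w.length := by omega
          have htake : List.take (largura + 1).toNat (w ++ ' ' :: tail)
              = List.take (largura + 1).toNat w := List.take_append_of_le_length hsmall
          have h0 : (List.take (largura + 1).toNat w).count ' ' = 0 := by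
            rw [List.count_eq_zero]
            intro hsp
            have := hwns ' ' (List.mem_of_mem_take hsp)
            simp [PySem.Chars.isspace] at this
          rw [htake, h0]
          simp [idxSpec, hb]
        · -- first word fits: peel it off and use the IH at largura - len w - 1
          have hwle : (w.length : Int) ≤ largura := by omega
          have hidx : idxSpec largura (w :: r :: rest') =
              1 + idxSpec (largura - w.length - 1) (r :: rest') := by
            simp [idxSpec, hb]
          rw [hidx, ← ih hrest (largura - w.length - 1)]
          by_cases hfit : ((w ++ ' ' :: tail).length : Int) ≤ largura
          · have hfit' : (tail.length : Int) ≤ largura - w.length - 1 := by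
              simp only [List.length_append, List.length_cons] at hfit
              push_cast at hfit ⊢
              omega
            rw [if_pos hfit, if_pos hfit']
            have : (w ++ ' ' :: tail).count ' ' = w.count ' ' + (1 + tail.count ' ') := by
              simp [List.count_append]
              omega
            rw [this, hwcnt]
            push_cast
            ring
          · have hfit' : ¬ (tail.length : Int) ≤ largura - w.length - 1 := by
              simp only [List.length_append, List.length_cons] at hfit
              push_cast at hfit ⊢
              omega
            rw [if_neg hfit, if_neg hfit']
            have hsplit : (largura + 1).toNat = w.length + 1 + (largura - w.length).toNat := by
              omega
            have htake : List.take (largura + 1).toNat (w ++ ' ' :: tail)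
                = w ++ ' ' :: List.take (largura - w.length).toNat tail := by
              rw [hsplit,
                  show w.length + 1 + (largura - ↑w.length).toNat
                    = w.length + ((largura - ↑w.length).toNat + 1) by omega,
                  List.take_append,
                  List.take_of_length_le (by omega : w.length ≤ _),
                  show w.length + ((largura - ↑w.length).toNat + 1) - w.length
                    = (largura - ↑w.length).toNat + 1 by omega,
                  List.take_succ_cons]
            rw [htake]
            have : (w ++ ' ' :: List.take (largura - w.length).toNat tail).count ' '
                = w.count ' ' + (1 + (List.take (largura - w.length).toNat tail).count ' ') := by
              simp [List.count_append]
              omega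
            rw [this, hwcnt]
            have harg : (largura - ↑w.length - 1 + 1).toNat = (largura - w.length).toNat := by
              omega
            rw [harg]
            push_cast
            ring

-- ===== VERDICT (by name: the statement is the Claim_ definition above) =====
theorem corta_texto_spec : Claim_equal_corta_texto := by
  intro texto largura _
  unfold Spec_corta_texto corta_texto corta_texto_alt
  have hgood : GoodWords (List.map String.toList (PySem.Str.split₀ texto)) := by
    rw [PySem.Str.split₀_map_toList]; exact goodWords_split₀ _
  have hnorm : (PySem.Str.join " " (PySem.Str.split₀ texto)).toList
      = List.intercalate [' '] (List.map String.toList (PySem.Str.split₀ texto)) := by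
    rw [PySem.Str.toList_join]
    rfl
  have hA : cortaLoopA largura (PySem.List.enumerate (PySem.Str.split₀ texto) 0) 0 0
      = idxSpec largura (List.map String.toList (PySem.Str.split₀ texto)) := by
    rw [loopA_eq_idxSpec]
    rcases PySem.Str.split₀ texto with _ | ⟨w, rest⟩
    · simp [idxSpec]
    · simp
  have hlen : PySem.Str.len (PySem.Str.join " " (PySem.Str.split₀ texto))
      = ((List.intercalate [' '] (List.map String.toList (PySem.Str.split₀ texto))).length : Int) := by
    simp only [PySem.Str.len_eq, hnorm]
  have hcntAll : PySem.Str.count (PySem.Str.join " " (PySem.Str.split₀ texto)) " "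
      = (List.intercalate [' '] (List.map String.toList (PySem.Str.split₀ texto))).count ' ' := by
    rw [PySem.Str.count_eq, hnorm, show (" " : String).toList = [' '] from rfl, count_single]
  have hcntPre : PySem.Str.count
        (PySem.Str.slice (PySem.Str.join " " (PySem.Str.split₀ texto)) none (some (max (largura + 1) 0))) " "
      = (List.take (largura + 1).toNat
          (List.intercalate [' '] (List.map String.toList (PySem.Str.split₀ texto)))).count ' ' := by
    rw [PySem.Str.count_eq, show (" " : String).toList = [' '] from rfl, count_single,
        PySem.Str.toList_slice, PySem.Chars.slice_eq_listSlice, hnorm,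
        PySem.List.slice_to _ (le_max_right _ _),
        show (max (largura + 1) 0).toNat = (largura + 1).toNat by omega]
  have hB : (if PySem.Str.len (PySem.Str.join " " (PySem.Str.split₀ texto)) ≤ largura
        then (PySem.Str.count (PySem.Str.join " " (PySem.Str.split₀ texto)) " " : Int)
        else (PySem.Str.count (PySem.Str.slice (PySem.Str.join " " (PySem.Str.split₀ texto)) none
                (some (max (largura + 1) 0))) " " : Int))
      = idxSpec largura (List.map String.toList (PySem.Str.split₀ texto)) := by
    rw [← countFormula_eq_idxSpec _ hgood largura, hlen, hcntAll, hcntPre]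
  simp only [hA, hB]
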